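-- pv_equiv track=rewrite | github.com/ashuxtim/DocuMind-AI | backend/parser.py | _extract_section_from_markdown
-- ===== SOURCE A (Python) =====
-- def _extract_section_from_markdown(text: str) -> str:
--     """
--     Extract the deepest section header from a markdown page/chunk.
--     Most specific header wins: h2 overrides h1, h3 inherits h2/h1 context.
--     Falls back to "General" if no headers found.
--
--     Stack approach: h1 sets context, h2 refines it, h3 inherits h2 (not
--     promoted to section name itself). This keeps section stable for the
--     audit pipeline — h3 granularity would fragment it too much.
--     """
--     h1 = h2 = None
--     for line in text.splitlines():
--         line = line.strip()
--         if line.startswith("### "):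
--             # h3 inherits current h2 or h1 — does not replace them
--             continue
--         elif line.startswith("## "):
--             h2 = line.lstrip("# ").strip()
--         elif line.startswith("# "):
--             h1 = line.lstrip("# ").strip()
--             h2 = None  # reset h2 on new h1
--     return h2 or h1 or "General"
-- ===== SOURCE B (Python) =====
-- def _extract_section_from_markdown(text: str) -> str:
--     # Reverse scan: the last "# " header is the final h1 (it reset h2), and the
--     # first "## " header seen before it (going backwards) is the final h2.
--     h1 = h2 = None
--     for raw in reversed(text.splitlines()):
--         line = raw.strip()
--         if line.startswith("## "):
--             if h2 is None:
--                 h2 = line.lstrip("# ").strip()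
--         elif line.startswith("# "):
--             h1 = line.lstrip("# ").strip()
--             break
--     return h2 or h1 or "General"
-- ===== Notes on version B (the rewrite author's own statement) =====
-- stated objective: alternative
-- what changed: B scans the lines in reverse with early exit: the first h2-level header met (before any h1) is the final h2 and the first h1-level header met is the final h1, at which point the scan stops, instead of A's full forward pass that keeps resetting state.
import Mathlib
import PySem

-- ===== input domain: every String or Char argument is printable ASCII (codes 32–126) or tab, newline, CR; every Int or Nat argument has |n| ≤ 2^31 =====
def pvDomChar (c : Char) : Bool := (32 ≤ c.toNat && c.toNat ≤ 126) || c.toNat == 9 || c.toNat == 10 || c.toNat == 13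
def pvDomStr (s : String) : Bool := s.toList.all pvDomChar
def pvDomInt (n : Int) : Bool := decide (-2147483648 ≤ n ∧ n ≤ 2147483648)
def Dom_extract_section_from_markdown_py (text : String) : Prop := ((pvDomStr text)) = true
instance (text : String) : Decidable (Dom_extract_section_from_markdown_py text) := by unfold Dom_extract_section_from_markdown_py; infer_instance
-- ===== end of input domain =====

-- B replaces A's full forward pass (with h2 reset on each new h1) by a reverse scan with
-- early exit; same return value, no side effects, equivalence proved below.

-- line.lstrip("# ").strip() — dropWhile is exact for Python's lstrip with a char set
def pvHdrText (l : List Char) : List Char :=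
  PySem.Chars.strip (l.dropWhile (fun c => c == '#' || c == ' '))

-- `x or y` on str/None: None and "" are falsy
def pvOrS (o : Option (List Char)) (d : List Char) : List Char :=
  match o with
  | some s => if s = [] then d else s
  | none => d

-- ===== PORT A =====
-- loop body of A: the three startswith branches, in A's order
def pvStepA (st : Option (List Char) × Option (List Char)) (line : List Char) :
    Option (List Char) × Option (List Char) :=
  let l := PySem.Chars.strip line
  if PySem.Chars.startswith l "### ".toList then st
  else if PySem.Chars.startswith l "## ".toList then (st.1, some (pvHdrText l))
  else if PySem.Chars.startswith l "# ".toList then (some (pvHdrText l), none)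
  else st

def extract_section_from_markdown_py (text : String) : String :=
  let r := (PySem.Chars.splitlines text.toList).foldl pvStepA (none, none)
  String.ofList (pvOrS r.2 (pvOrS r.1 "General".toList))

-- ===== PORT B =====
-- the reverse loop of Source B, with `break` as returning the final (h1, h2) pair
def pvAltGo (lines : List (List Char)) (h2 : Option (List Char)) :
    Option (List Char) × Option (List Char) :=
  match lines with
  | [] => (none, h2)
  | raw :: rest =>
    let line := PySem.Chars.strip raw
    if PySem.Chars.startswith line "## ".toList then
      pvAltGo rest (match h2 with | none => some (pvHdrText line) | some v => some v)
    else if PySem.Chars.startswith line "# ".toList then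
      (some (pvHdrText line), h2)
    else pvAltGo rest h2

def extract_section_from_markdown_py_alt (text : String) : String :=
  let r := pvAltGo (PySem.Chars.splitlines text.toList).reverse none
  String.ofList (pvOrS r.2 (pvOrS r.1 "General".toList))

-- ===== PRECONDITION & SPEC =====
def Spec_extract_section_from_markdown_py (text : String) (out : String) : Prop := out = extract_section_from_markdown_py_alt text
instance (text : String) (out : String) : Decidable (Spec_extract_section_from_markdown_py text out) := by unfold Spec_extract_section_from_markdown_py; infer_instance

-- ===== CLAIM (what is proved, stated in full; the proofs are below) =====
def Claim_equal_extract_section_from_markdown_py : Prop := ∀ (text : String), Dom_extract_section_from_markdown_py text → Spec_extract_section_from_markdown_py text (extract_section_from_markdown_py text)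

-- ===== LEMMAS AND PROOFS =====

-- token abstraction of a line, as both loop bodies see it
inductive PvTok where
  | h1 : List Char → PvTok
  | h2 : List Char → PvTok
  | oth : PvTok

def pvClassify (raw : List Char) : PvTok :=
  let l := PySem.Chars.strip raw
  if PySem.Chars.startswith l "## ".toList then PvTok.h2 (pvHdrText l)
  else if PySem.Chars.startswith l "# ".toList then PvTok.h1 (pvHdrText l)
  else PvTok.oth

def pvTStep (st : Option (List Char) × Option (List Char)) (t : PvTok) :
    Option (List Char) × Option (List Char) :=
  match t with
  | PvTok.h2 s => (st.1, some s)
  | PvTok.h1 s => (some s, none)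
  | PvTok.oth => st

def pvTBwd (ts : List PvTok) (h2 : Option (List Char)) :
    Option (List Char) × Option (List Char) :=
  match ts with
  | [] => (none, h2)
  | PvTok.h2 s :: rest => pvTBwd rest (match h2 with | none => some s | some v => some v)
  | PvTok.h1 s :: _ => (some s, h2)
  | PvTok.oth :: rest => pvTBwd rest h2

-- A's step is pvTStep ∘ pvClassify (a line starting with "### " starts with neither "## " nor "# ")
lemma pvStepA_eq (st : Option (List Char) × Option (List Char)) (line : List Char) :
    pvStepA st line = pvTStep st (pvClassify line) := by
  simp only [pvStepA, pvClassify, pvTStep]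
  split_ifs with h3 h2 h1 <;> try rfl
  · rw [PySem.Chars.startswith_iff] at h3 h2
    exact absurd (List.prefix_of_prefix_length_le h2 h3 (by decide)) (by decide)
  · rw [PySem.Chars.startswith_iff] at h3 h1
    exact absurd (List.prefix_of_prefix_length_le h1 h3 (by decide)) (by decide)

lemma pvFoldA_eq (lines : List (List Char)) (st : Option (List Char) × Option (List Char)) :
    lines.foldl pvStepA st = (lines.map pvClassify).foldl pvTStep st := by
  induction lines generalizing st with
  | nil => rfl
  | cons a rest ih =>
    simp only [List.foldl_cons, List.map_cons]
    rw [pvStepA_eq]; exact ih _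

-- B's loop is pvTBwd over classified lines
lemma pvAltGo_eq (lines : List (List Char)) (h2 : Option (List Char)) :
    pvAltGo lines h2 = pvTBwd (lines.map pvClassify) h2 := by
  induction lines generalizing h2 with
  | nil => rfl
  | cons a rest ih =>
    simp only [pvAltGo, pvClassify, List.map_cons]
    split_ifs with hA hB <;> simp [pvTBwd, ih]

-- the first component of pvTBwd does not depend on the accumulator
lemma pvTBwd_fst (ts : List PvTok) (a b : Option (List Char)) :
    (pvTBwd ts a).1 = (pvTBwd ts b).1 := by
  induction ts generalizing a b with
  | nil => rfl
  | cons t rest ih =>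
    cases t with
    | h1 s => rfl
    | oth => exact ih a b
    | h2 s => cases a <;> cases b <;> simp [pvTBwd] <;> exact ih _ _

lemma pvTBwd_snd_some (ts : List PvTok) (v : List Char) :
    (pvTBwd ts (some v)).2 = some v := by
  induction ts with
  | nil => rfl
  | cons t rest ih => cases t <;> simp [pvTBwd, ih]

-- forward fold = reverse scan, with the initial state folded in
lemma pvCore (ts : List PvTok) (s : Option (List Char) × Option (List Char)) :
    ts.foldl pvTStep s =
      ((pvTBwd ts.reverse none).1.or s.1,
       (pvTBwd ts.reverse none).2.or
         (if (pvTBwd ts.reverse none).1.isSome then none else s.2)) := by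
  induction ts using List.reverseRecOn generalizing s with
  | nil => cases s with | mk a b => simp [pvTBwd]
  | append_singleton rest c ih =>
    rw [List.foldl_append, List.reverse_append]
    cases c with
    | h1 t => simp [pvTStep, pvTBwd]
    | oth => simp [pvTStep, pvTBwd, ih]
    | h2 t =>
      simp only [List.foldl_cons, List.foldl_nil, pvTStep, List.reverse_singleton,
        List.singleton_append, pvTBwd]
      rw [ih s]
      rw [pvTBwd_fst rest.reverse (some t) none, pvTBwd_snd_some]
      simp

-- ===== VERDICT (by name: the statement is the Claim_ definition above) =====
theorem extract_section_from_markdown_py_spec : Claim_equal_extract_section_from_markdown_py := by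
  intro text _
  show _ = _
  unfold extract_section_from_markdown_py extract_section_from_markdown_py_alt
  simp only [pvFoldA_eq, pvAltGo_eq, List.map_reverse]
  rw [pvCore]
  rcases pvTBwd ((PySem.Chars.splitlines text.toList).map pvClassify).reverse none with ⟨b1, b2⟩
  cases b1 <;> cases b2 <;> simp [pvOrS, Option.or]
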